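-- pv_equiv track=rewrite | github.com/rahulatrkm/HelloInterview | Breadth-First Search/busRoutes.py | bus_routes
-- ===== SOURCE A (Python) =====
-- from collections import deque, defaultdict
--
-- def bus_routes(routes: list[list[int]], source: int, target: int) -> int:
--     # Your code goes here
--     if source == target:
--         return 0
--     n = len(routes)
--     stop2routes = defaultdict(list)
--     for i, route in enumerate(routes):
--         routes[i] = set(route)
--         for stop in route:
--             stop2routes[stop].append(i)
--     q = deque()
--     q.append((source, 0))
--     vis = {}
--     while q:
--         stop, d = q.popleft()
--         if d > n:
--             continue
--         for i in stop2routes[stop]: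
--             if target in routes[i]:
--                 return d+1
--             if i not in vis:
--                 vis[i] = d
--             else:
--                 continue
--             for nex_stop in routes[i]:
--                 q.append((nex_stop, d+1))
--     return -1
-- ===== SOURCE B (Python) =====
-- def bus_routes(routes: list[list[int]], source: int, target: int) -> int:
--     # Round-based set expansion: reach = stops reachable with < k buses;
--     # each round absorbs every route touching reach. No queue, no per-route
--     # visited bookkeeping; at most len(routes) productive rounds.
--     if source == target:
--         return 0
--     reach = {source}
--     for k in range(1, len(routes) + 1):
--         new = set(reach)
--         for route in routes:
--             if any(s in reach for s in route):
--                 new.update(route)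
--         if target in new:
--             return k
--         if len(new) == len(reach):
--             return -1
--         reach = new
--     return -1
-- ===== Notes on version B (the rewrite author's own statement) =====
-- stated objective: alternative
-- what changed: Replaced the deque-based stop-BFS with its stop->routes adjacency dict and per-route visited dict by a queue-free round-based fixpoint expansion: each round absorbs every route touching the current reachable stop set and counts rounds until the target appears or the set stabilises.
import Mathlib
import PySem

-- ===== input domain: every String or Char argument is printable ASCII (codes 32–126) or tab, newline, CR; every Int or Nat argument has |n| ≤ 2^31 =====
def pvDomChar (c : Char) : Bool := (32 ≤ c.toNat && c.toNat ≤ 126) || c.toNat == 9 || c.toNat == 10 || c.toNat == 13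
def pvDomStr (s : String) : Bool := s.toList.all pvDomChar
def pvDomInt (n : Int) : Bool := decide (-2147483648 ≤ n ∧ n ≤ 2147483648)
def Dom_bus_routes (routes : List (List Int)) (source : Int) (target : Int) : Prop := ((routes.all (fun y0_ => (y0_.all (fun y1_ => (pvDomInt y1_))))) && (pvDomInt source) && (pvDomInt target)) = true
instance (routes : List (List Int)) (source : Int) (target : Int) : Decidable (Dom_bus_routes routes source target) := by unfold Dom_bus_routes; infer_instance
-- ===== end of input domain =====

-- B replaces A's deque stop-BFS (with a per-route visited dict) by a queue-free round-based
-- expansion of the reachable stop set; equivalence is about the RETURN value only (Python A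
-- mutates its `routes` argument in place, replacing each list by a set; B does not).

-- ===== PORT A =====
-- inner `for i in stop2routes[stop]` loop: may return early with d+1, else yields updated queue and vis
def pvBusInner (rs : List (PySem.Set Int)) (target : Int) (d : Int) :
    List Int → List (Int × Int) → PySem.Dict Int Int →
      Option Int × List (Int × Int) × PySem.Dict Int Int
  | [], q, vis => (none, q, vis)
  | i :: is, q, vis =>
    if PySem.Set.contains (PySem.List.pyGetD rs i []) target then (some (d + 1), q, vis)
    else if vis.contains i then pvBusInner rs target d is q vis
    else pvBusInner rs target d is
      (q ++ (PySem.List.pyGetD rs i []).map (fun s => (s, d + 1)))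
      (vis.insert i d)

-- `while q:` loop; fuel only makes the recursion structural (it is proved never to run out)
def pvBusLoop (rs : List (PySem.Set Int)) (adj : PySem.Dict Int (List Int)) (target : Int) (n : Int) :
    Nat → List (Int × Int) → PySem.Dict Int Int → Int
  | 0, _, _ => -1
  | _ + 1, [], _ => -1
  | f + 1, (stop, d) :: rest, vis =>
    if d > n then pvBusLoop rs adj target n f rest vis
    else
      match pvBusInner rs target d (adj.getD stop []) rest vis with
      | (some ans, _, _) => ans
      | (none, q', vis') => pvBusLoop rs adj target n f q' vis'

def bus_routes (routes : List (List Int)) (source : Int) (target : Int) : Int :=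
  if source = target then 0
  else
    let n : Int := routes.length
    let built := (PySem.List.enumerate routes 0).foldl
      (fun (acc : List (PySem.Set Int) × PySem.Dict Int (List Int)) ir =>
        (acc.1 ++ [PySem.Set.ofList ir.2],
         ir.2.foldl (fun d stop => d.modify stop [] (fun l => l ++ [ir.1])) acc.2))
      ([], PySem.Dict.empty)
    pvBusLoop built.1 built.2 target n (routes.flatten.length + 2)
      [(source, 0)] PySem.Dict.empty

-- ===== PORT B =====
-- `while True:` round loop of Source B; fuel only makes the recursion structural (reach grows strictly)
def pvAltLoop (routes : List (List Int)) (target : Int) :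
    Nat → Int → PySem.Set Int → Int
  | 0, _, _ => -1
  | f + 1, buses, reach =>
    let nw := routes.foldl
      (fun nw route =>
        if route.any (fun s => PySem.Set.contains reach s) then PySem.Set.update nw route else nw)
      (PySem.Set.ofList reach)
    if PySem.Set.contains nw target then buses
    else if PySem.Set.len nw = PySem.Set.len reach then -1
    else pvAltLoop routes target f (buses + 1) nw

def bus_routes_alt (routes : List (List Int)) (source : Int) (target : Int) : Int :=
  if source = target then 0
  else pvAltLoop routes target (routes.flatten.length + 2) 1
    (PySem.Set.add PySem.Set.empty source)

-- ===== PRECONDITION & SPEC =====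
def Spec_bus_routes (routes : List (List Int)) (source : Int) (target : Int) (out : Int) : Prop := out = bus_routes_alt routes source target
instance (routes : List (List Int)) (source : Int) (target : Int) (out : Int) : Decidable (Spec_bus_routes routes source target out) := by unfold Spec_bus_routes; infer_instance

-- ===== CLAIM (what is proved, stated in full; the proofs are below) =====
def Claim_equal_bus_routes : Prop := ∀ (routes : List (List Int)) (source : Int) (target : Int), Dom_bus_routes routes source target → Spec_bus_routes routes source target (bus_routes routes source target)

-- ===== LEMMAS AND PROOFS =====

-- stops reachable with at most k buses
def pvD (routes : List (List Int)) (source : Int) : Nat → Int → Bool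
  | 0, s => s == source
  | k + 1, s => pvD routes source k s ||
      routes.any (fun r => r.contains s && r.any (fun t => pvD routes source k t))

-- the common answer both programs compute: least k with target reachable in k buses, else -1
noncomputable def pvAns (routes : List (List Int)) (source : Int) (target : Int) : Int := by
  classical
  exact if h : ∃ k, pvD routes source k target = true then ((Nat.find h : Nat) : Int) else -1

def pvValid (routes : List (List Int)) (i : Int) : Prop := 0 ≤ i ∧ i.toNat < routes.length

def pvRoute (routes : List (List Int)) (i : Int) : List Int := routes.getD i.toNat []

def pvClosed (routes : List (List Int)) (vis : PySem.Dict Int Int) (s : Int) : Prop :=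
  ∀ j, pvValid routes j → s ∈ pvRoute routes j → j ∈ vis.keys

def pvUnvisSum (routes : List (List Int)) (vis : PySem.Dict Int Int) : Nat :=
  ∑ j ∈ Finset.range routes.length,
    if ((j : Int) ∈ vis.keys) then 0 else (PySem.Set.ofList (pvRoute routes (j : Int))).length

def pvAdjFrom : List (List Int) → Int → PySem.Dict Int (List Int) → PySem.Dict Int (List Int)
  | [], _, d => d
  | r :: tl, s, d => pvAdjFrom tl (s + 1) (r.foldl (fun d stop => d.modify stop [] (fun l => l ++ [s])) d)

def pvAdj (routes : List (List Int)) : PySem.Dict Int (List Int) :=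
  pvAdjFrom routes 0 PySem.Dict.empty

structure pvInv (routes : List (List Int)) (source target : Int) (k : Nat)
    (cur nxt : List Int) (vis : PySem.Dict Int Int) (fuel : Nat) : Prop where
  hcur : ∀ s ∈ cur, pvD routes source k s = true
  hnxt : ∀ s ∈ nxt, pvD routes source (k + 1) s = true
  hvk : ∀ i ∈ vis.keys, pvValid routes i
  hvisT : ∀ i ∈ vis.keys, target ∉ pvRoute routes i
  hE : ∀ i, pvValid routes i → (∃ s ∈ pvRoute routes i, pvD routes source k s = true) →
      i ∈ vis.keys ∨ ∃ s ∈ cur, s ∈ pvRoute routes i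
  hF : ∀ i ∈ vis.keys, ∀ s ∈ pvRoute routes i, pvClosed routes vis s ∨ s ∈ cur ∨ s ∈ nxt
  hG : ∀ i, pvValid routes i → target ∈ pvRoute routes i →
      ∀ s ∈ pvRoute routes i, ∀ d' < k, ¬ pvD routes source d' s = true
  hnd : vis.keys.Nodup
  hdn : k ≤ vis.size ∨ k = 0
  hnx : nxt ≠ [] → k + 1 ≤ vis.size
  hfuel : cur.length + nxt.length + 1 + pvUnvisSum routes vis ≤ fuel

-- ---- basic facts about pvD ----
theorem pvD_zero (routes : List (List Int)) (source s : Int) :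
    pvD routes source 0 s = true ↔ s = source := by
  simp [pvD]

theorem pvD_succ (routes : List (List Int)) (source : Int) (k : Nat) (s : Int) :
    pvD routes source (k + 1) s = true ↔
      pvD routes source k s = true ∨
      ∃ r ∈ routes, s ∈ r ∧ ∃ t ∈ r, pvD routes source k t = true := by
  simp [pvD, List.any_eq_true]

theorem pvD_mono (routes : List (List Int)) (source : Int) {j k : Nat} (h : j ≤ k) {s : Int}
    (hs : pvD routes source j s = true) : pvD routes source k s = true := by
  induction k with
  | zero =>
    have : j = 0 := by omega
    exact this ▸ hs
  | succ k ih =>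
    rcases Nat.lt_or_ge j (k+1) with h' | h'
    · exact (pvD_succ routes source k s).2 (Or.inl (ih (by omega)))
    · have : j = k + 1 := by omega
      exact this ▸ hs

theorem pvD_congr (routes : List (List Int)) (source : Int) {a b : Nat}
    (h : ∀ t, pvD routes source a t = pvD routes source b t) (s : Int) :
    pvD routes source (a + 1) s = pvD routes source (b + 1) s := by
  simp only [pvD, h]

theorem pvAns_hit (routes : List (List Int)) (source target : Int) (m : Nat)
    (h : pvD routes source m target = true)
    (hmin : ∀ j < m, ¬ pvD routes source j target = true) :
    pvAns routes source target = (m : Int) := by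
  unfold pvAns
  have hex : ∃ k, pvD routes source k target = true := ⟨m, h⟩
  simp only [hex, dif_pos]
  congr 1
  exact Nat.find_eq_iff hex |>.2 ⟨h, fun j hj => hmin j hj⟩

theorem pvAns_neg (routes : List (List Int)) (source target : Int)
    (h : ∀ k, ¬ pvD routes source k target = true) :
    pvAns routes source target = -1 := by
  unfold pvAns
  have hex : ¬ ∃ k, pvD routes source k target = true := by
    rintro ⟨k, hk⟩; exact h k hk
  simp only [hex, dif_neg, not_false_iff]

theorem pvRoute_eq (routes : List (List Int)) (j : Nat) (h : j < routes.length) :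
    pvRoute routes (j : Int) = routes[j] := by
  simp [pvRoute, List.getD_eq_getElem?_getD, List.getElem?_eq_getElem h]

theorem pvAdjFrom_mem (routes : List (List Int)) :
    ∀ (s : Int) (d : PySem.Dict Int (List Int)) (c i : Int),
    i ∈ (pvAdjFrom routes s d).getD c [] ↔
      i ∈ d.getD c [] ∨ ∃ (j : Nat) (_ : j < routes.length), i = s + j ∧ c ∈ routes[j] := by
  induction routes with
  | nil => intro s d c i; simp [pvAdjFrom]
  | cons r tl ih =>
    intro s d c i
    rw [show pvAdjFrom (r :: tl) s d
        = pvAdjFrom tl (s + 1) (r.foldl (fun d stop => d.modify stop [] (fun l => l ++ [s])) d) from rfl,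
      ih]
    have hfold : r.foldl (fun d stop => d.modify stop [] (fun l => l ++ [s])) d
        = (r.map (fun st => (st, s))).foldl (fun d p => d.modify p.1 [] (fun l => l ++ [p.2])) d := by
      rw [List.foldl_map]
    have hinner : (r.foldl (fun d stop => d.modify stop [] (fun l => l ++ [s])) d).getD c []
        = d.getD c [] ++ ((r.map (fun st => (st, s))).filter (fun p => p.1 == c)).map (·.2) := by
      rw [hfold]; exact PySem.Dict.getD_foldl_modify_append ..
    rw [hinner]
    simp only [List.mem_append, List.mem_map, List.mem_filter]
    constructor
    · rintro ((h | ⟨p, ⟨⟨st, hst, rfl⟩, hbeq⟩, rfl⟩) | ⟨j, hj, rfl, hc⟩)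
      · exact Or.inl h
      · refine Or.inr ⟨0, by simp, by simp, ?_⟩
        simp only [beq_iff_eq] at hbeq
        simpa [← hbeq] using hst
      · exact Or.inr ⟨j + 1, by simpa using hj, by push_cast; ring, by simpa using hc⟩
    · rintro (h | ⟨j, hj, rfl, hc⟩)
      · exact Or.inl (Or.inl h)
      · match j with
        | 0 =>
          refine Or.inl (Or.inr ⟨(c, s), ⟨⟨c, by simpa using hc, rfl⟩, by simp⟩, by simp⟩)
        | j + 1 =>
          exact Or.inr ⟨j, by simpa using hj, by push_cast; ring, by simpa using hc⟩

theorem pvAdj_mem (routes : List (List Int)) (c i : Int) :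
    i ∈ (pvAdj routes).getD c [] ↔ pvValid routes i ∧ c ∈ pvRoute routes i := by
  rw [pvAdj, pvAdjFrom_mem]
  simp only [PySem.Dict.getD_empty, List.not_mem_nil, false_or, zero_add]
  constructor
  · rintro ⟨j, hj, rfl, hc⟩
    refine ⟨⟨by positivity, by simpa using hj⟩, ?_⟩
    rwa [pvRoute_eq _ j hj]
  · rintro ⟨⟨h0, hlt⟩, hc⟩
    refine ⟨i.toNat, hlt, by omega, ?_⟩
    rw [← pvRoute_eq _ _ hlt, Int.toNat_of_nonneg h0]
    exact hc

theorem pvBuild (routes : List (List Int)) :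
    ∀ (s : Int) (accL : List (PySem.Set Int)) (accD : PySem.Dict Int (List Int)),
    (PySem.List.enumerate routes s).foldl
      (fun (acc : List (PySem.Set Int) × PySem.Dict Int (List Int)) ir =>
        (acc.1 ++ [PySem.Set.ofList ir.2],
         ir.2.foldl (fun d stop => d.modify stop [] (fun l => l ++ [ir.1])) acc.2))
      (accL, accD)
    = (accL ++ routes.map PySem.Set.ofList, pvAdjFrom routes s accD) := by
  induction routes with
  | nil => intro s accL accD; simp [pvAdjFrom, PySem.List.enumerate_nil]
  | cons r tl ih =>
    intro s accL accD
    rw [PySem.List.enumerate_cons, List.foldl_cons, ih]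
    simp [pvAdjFrom]

theorem pvUnvisSum_insert (routes : List (List Int)) (vis : PySem.Dict Int Int) (i : Int) (v : Int)
    (hval : pvValid routes i) (hni : i ∉ vis.keys) :
    pvUnvisSum routes (vis.insert i v) + (PySem.Set.ofList (pvRoute routes i)).length
      = pvUnvisSum routes vis := by
  unfold pvUnvisSum
  obtain ⟨h0, hlt⟩ := hval
  have hmem : i.toNat ∈ Finset.range routes.length := Finset.mem_range.2 hlt
  rw [← Finset.sum_erase_add _ _ hmem, ← Finset.sum_erase_add _ _ hmem]
  have hterm1 : (if ((i.toNat : Int) ∈ (vis.insert i v).keys) then 0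
      else (PySem.Set.ofList (pvRoute routes (i.toNat : Int))).length) = 0 := by
    simp [PySem.Dict.mem_keys_insert, Int.toNat_of_nonneg h0]
  have hterm2 : (if ((i.toNat : Int) ∈ vis.keys) then 0
      else (PySem.Set.ofList (pvRoute routes (i.toNat : Int))).length)
      = (PySem.Set.ofList (pvRoute routes i)).length := by
    rw [Int.toNat_of_nonneg h0]; simp [hni]
  rw [hterm1, hterm2]
  have hcong : ∀ j ∈ (Finset.range routes.length).erase i.toNat,
      (if ((j : Int) ∈ (vis.insert i v).keys) then 0
        else (PySem.Set.ofList (pvRoute routes (j : Int))).length)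
      = (if ((j : Int) ∈ vis.keys) then 0
        else (PySem.Set.ofList (pvRoute routes (j : Int))).length) := by
    intro j hj
    have hji : (j : Int) ≠ i := by
      have := Finset.ne_of_mem_erase hj
      omega
    simp [PySem.Dict.mem_keys_insert, hji]
  rw [Finset.sum_congr rfl hcong]
  omega

theorem pvKeysBound (routes : List (List Int)) (l : List Int)
    (hnd : l.Nodup) (hval : ∀ i ∈ l, pvValid routes i) : l.length ≤ routes.length := by
  have h1 : (l.map Int.toNat).Nodup := by
    refine List.Nodup.map_on ?_ hnd
    intro x hx y hy hxy
    have hx' := (hval x hx).1; have hy' := (hval y hy).1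
    omega
  have h2 : l.map Int.toNat ⊆ List.range routes.length := by
    intro j hj
    simp only [List.mem_map] at hj
    obtain ⟨x, hx, rfl⟩ := hj
    exact List.mem_range.2 (hval x hx).2
  have := (h1.subperm h2).length_le
  simpa using this

theorem pvSize_eq (vis : PySem.Dict Int Int) : vis.size = vis.keys.length := by
  simp [PySem.Dict.size, PySem.Dict.keys]

theorem pvGetSet (routes : List (List Int)) (i : Int) (h : pvValid routes i) :
    PySem.List.pyGetD (routes.map PySem.Set.ofList) i []
      = PySem.Set.ofList (pvRoute routes i) := by
  obtain ⟨h0, hlt⟩ := h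
  have hlt' : i < ((routes.map PySem.Set.ofList).length : Int) := by
    simp only [List.length_map]; omega
  rw [PySem.List.pyGetD_eq_getElem _ _ h0 hlt']
  rw [List.getElem_map]
  congr 1
  rw [pvRoute, List.getD_eq_getElem?_getD, List.getElem?_eq_getElem hlt]
  rfl

theorem pvContainsSet (r : List Int) (x : Int) :
    PySem.Set.contains (PySem.Set.ofList r) x = true ↔ x ∈ r := by
  rw [PySem.Set.contains_iff, PySem.Set.mem_ofList]

theorem pvInner_hit (routes : List (List Int)) (target : Int) (d : Int) :
    ∀ (is : List Int) (q : List (Int × Int)) (vis : PySem.Dict Int Int),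
    (∀ i ∈ is, pvValid routes i) →
    (∃ i ∈ is, target ∈ pvRoute routes i) →
    (pvBusInner (routes.map PySem.Set.ofList) target d is q vis).1 = some (d + 1) := by
  intro is
  induction is with
  | nil => intro q vis _ hhit; simp at hhit
  | cons i0 tl ih =>
    intro q vis hval hhit
    have hv0 := hval i0 (by simp)
    rw [pvBusInner, pvGetSet routes i0 hv0]
    by_cases hc : PySem.Set.contains (PySem.Set.ofList (pvRoute routes i0)) target = true
    · rw [if_pos hc]
    · have htl : ∃ i ∈ tl, target ∈ pvRoute routes i := by
        obtain ⟨i, hi, hti⟩ := hhit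
        rcases List.mem_cons.1 hi with rfl | hi'
        · exact absurd ((pvContainsSet _ _).2 hti) hc
        · exact ⟨i, hi', hti⟩
      rw [if_neg hc]
      by_cases hvc : vis.contains i0 = true
      · rw [if_pos hvc]; exact ih _ _ (fun i hi => hval i (by simp [hi])) htl
      · rw [if_neg hvc]; exact ih _ _ (fun i hi => hval i (by simp [hi])) htl
theorem pvInner_miss (routes : List (List Int)) (target : Int) (d : Int) :
    ∀ (is : List Int) (q : List (Int × Int)) (vis : PySem.Dict Int Int),
    (∀ i ∈ is, pvValid routes i) →
    (∀ i ∈ is, target ∉ pvRoute routes i) →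
    vis.keys.Nodup →
    ∃ ns vis',
      pvBusInner (routes.map PySem.Set.ofList) target d is q vis
        = (none, q ++ ns.map (fun s => (s, d + 1)), vis') ∧
      (∀ j, j ∈ vis'.keys ↔ j ∈ vis.keys ∨ j ∈ is) ∧
      (∀ s ∈ ns, ∃ i ∈ is, s ∈ pvRoute routes i) ∧
      (∀ i ∈ is, i ∉ vis.keys → ∀ s ∈ pvRoute routes i, s ∈ ns) ∧
      vis'.keys.Nodup ∧
      vis.size ≤ vis'.size ∧ (ns ≠ [] → vis.size < vis'.size) ∧
      ns.length + pvUnvisSum routes vis' ≤ pvUnvisSum routes vis := by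
  intro is
  induction is with
  | nil =>
    intro q vis _ _ hnd
    exact ⟨[], vis, by simp [pvBusInner], by simp, by simp, by simp, hnd, le_refl _, by simp, by simp⟩
  | cons i0 tl ih =>
    intro q vis hval hmiss hnd
    have hv0 := hval i0 (by simp)
    have hm0 := hmiss i0 (by simp)
    have hc : ¬ PySem.Set.contains (PySem.Set.ofList (pvRoute routes i0)) target = true := by
      intro h; exact hm0 ((pvContainsSet _ _).1 h)
    rw [pvBusInner, pvGetSet routes i0 hv0, if_neg hc]
    by_cases hvc : vis.contains i0 = true
    · rw [if_pos hvc]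
      obtain ⟨ns, vis', heq, hkeys, hsrc, hcov, hnd', hle, hlt, hsum⟩ :=
        ih q vis (fun i hi => hval i (by simp [hi])) (fun i hi => hmiss i (by simp [hi])) hnd
      have hi0 : i0 ∈ vis.keys := (PySem.Dict.contains_iff_mem_keys vis i0).1 hvc
      refine ⟨ns, vis', heq, ?_, ?_, ?_, hnd', hle, hlt, hsum⟩
      · intro j
        rw [hkeys j]
        constructor
        · rintro (h | h) <;> simp [h]
        · rintro (h | h)
          · exact Or.inl h
          · rcases List.mem_cons.1 h with rfl | h'
            · exact Or.inl hi0
            · exact Or.inr h'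
      · intro s hs
        obtain ⟨i, hi, his⟩ := hsrc s hs
        exact ⟨i, by simp [hi], his⟩
      · intro i hi hni s hs
        rcases List.mem_cons.1 hi with rfl | hi'
        · exact absurd hi0 hni
        · exact hcov i hi' hni s hs
    · rw [if_neg hvc]
      have hni0 : i0 ∉ vis.keys := fun h => hvc ((PySem.Dict.contains_iff_mem_keys vis i0).2 h)
      obtain ⟨ns, vis', heq, hkeys, hsrc, hcov, hnd', hle, hlt, hsum⟩ :=
        ih (q ++ (PySem.Set.ofList (pvRoute routes i0)).map (fun s => (s, d + 1))) (vis.insert i0 d)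
          (fun i hi => hval i (by simp [hi])) (fun i hi => hmiss i (by simp [hi]))
          (PySem.Dict.nodup_keys_insert vis i0 d hnd)
      refine ⟨PySem.Set.ofList (pvRoute routes i0) ++ ns, vis', ?_, ?_, ?_, ?_, hnd', ?_, ?_, ?_⟩
      · rw [heq]; simp [List.append_assoc]
      · intro j
        rw [hkeys j]
        simp only [PySem.Dict.mem_keys_insert, List.mem_cons]
        tauto
      · intro s hs
        rcases List.mem_append.1 hs with h | h
        · exact ⟨i0, by simp, (PySem.Set.mem_ofList _ _).1 h⟩
        · obtain ⟨i, hi, his⟩ := hsrc s h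
          exact ⟨i, by simp [hi], his⟩
      · intro i hi hni s hs
        rcases List.mem_cons.1 hi with rfl | hi'
        · exact List.mem_append.2 (Or.inl ((PySem.Set.mem_ofList _ _).2 hs))
        · by_cases hii : i = i0
          · subst hii
            exact List.mem_append.2 (Or.inl ((PySem.Set.mem_ofList _ _).2 hs))
          · have : i ∉ (vis.insert i0 d).keys := by
              rw [PySem.Dict.mem_keys_insert]
              rintro (rfl | h)
              · exact hii rfl
              · exact hni h
            exact List.mem_append.2 (Or.inr (hcov i hi' this s hs))
      · have : vis.size < (vis.insert i0 d).size := by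
          rw [PySem.Dict.size_insert, if_neg (by simp [hvc])]
          omega
        omega
      · intro _
        have : vis.size < (vis.insert i0 d).size := by
          rw [PySem.Dict.size_insert, if_neg (by simp [hvc])]
          omega
        omega
      · have hins := pvUnvisSum_insert routes vis i0 d hv0 hni0
        simp only [List.length_append]
        omega
theorem pvRoute_mem (routes : List (List Int)) (i : Int) (h : pvValid routes i) :
    pvRoute routes i ∈ routes := by
  rw [pvRoute, List.getD_eq_getElem?_getD, List.getElem?_eq_getElem h.2]
  exact List.getElem_mem h.2

theorem pvIdxOf (routes : List (List Int)) {r : List Int} (hr : r ∈ routes) :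
    ∃ i : Int, pvValid routes i ∧ pvRoute routes i = r := by
  obtain ⟨idx, hidx, heq⟩ := List.mem_iff_getElem.1 hr
  refine ⟨(idx : Int), ⟨by positivity, by simpa using hidx⟩, ?_⟩
  rw [pvRoute_eq _ _ hidx, heq]

theorem pvClosure (routes : List (List Int)) (source target : Int) (k : Nat)
    (vis : PySem.Dict Int Int) (fuel : Nat)
    (inv : pvInv routes source target k [] [] vis fuel) :
    ∀ m s, pvD routes source m s = true → pvClosed routes vis s := by
  intro m
  induction m with
  | zero =>
    intro s hs
    rw [pvD_zero] at hs
    intro j hj hsj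
    have hD0 : pvD routes source 0 s = true := by rw [pvD_zero]; exact hs
    rcases inv.hE j hj ⟨s, hsj, pvD_mono routes source (Nat.zero_le k) hD0⟩
      with h | ⟨s', hs', _⟩
    · exact h
    · simp at hs'
  | succ m ih =>
    intro s hs
    rcases (pvD_succ routes source m s).1 hs with h | ⟨r, hr, hsr, t, htr, ht⟩
    · exact ih s h
    · obtain ⟨i, hival, hiroute⟩ := pvIdxOf routes hr
      have hivis : i ∈ vis.keys := (ih t ht) i hival (by rwa [hiroute])
      rcases inv.hF i hivis s (by rwa [hiroute]) with h | h | h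
      · exact h
      · simp at h
      · simp at h

theorem pvNoTarget (routes : List (List Int)) (source target : Int) (k : Nat)
    (vis : PySem.Dict Int Int) (fuel : Nat) (hsne : source ≠ target)
    (inv : pvInv routes source target k [] [] vis fuel) :
    ∀ m, ¬ pvD routes source m target = true := by
  intro m
  induction m with
  | zero => rw [pvD_zero]; exact fun h => hsne h.symm
  | succ m ih =>
    intro h
    rcases (pvD_succ routes source m target).1 h with h' | ⟨r, hr, htr, t, htr', ht⟩
    · exact ih h'
    · obtain ⟨i, hival, hiroute⟩ := pvIdxOf routes hr
      have hivis : i ∈ vis.keys :=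
        (pvClosure routes source target k vis fuel inv m t ht) i hival (by rwa [hiroute])
      exact inv.hvisT i hivis (by rwa [hiroute])

theorem pvMissBelow (routes : List (List Int)) (source target : Int) (k : Nat)
    (cur nxt : List Int) (vis : PySem.Dict Int Int) (fuel : Nat) (hsne : source ≠ target)
    (inv : pvInv routes source target k cur nxt vis fuel) :
    ∀ m ≤ k, ¬ pvD routes source m target = true := by
  intro m
  induction m with
  | zero => intro _; rw [pvD_zero]; exact fun h => hsne h.symm
  | succ m ih =>
    intro hmk h
    rcases (pvD_succ routes source m target).1 h with h' | ⟨r, hr, htr, t, htr', ht⟩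
    · exact ih (by omega) h'
    · obtain ⟨i, hival, hiroute⟩ := pvIdxOf routes hr
      exact inv.hG i hival (by rwa [hiroute]) t (by rwa [hiroute]) m (by omega) ht

theorem pvTrans (routes : List (List Int)) (source target : Int) (k : Nat)
    (nxt : List Int) (vis : PySem.Dict Int Int) (fuel : Nat)
    (hne : nxt ≠ [])
    (inv : pvInv routes source target k [] nxt vis fuel) :
    pvInv routes source target (k + 1) nxt [] vis fuel := by
  refine ⟨inv.hnxt, by simp, inv.hvk, inv.hvisT, ?_, ?_, ?_, inv.hnd, Or.inl (inv.hnx hne), by simp, ?_⟩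
  · -- hE
    rintro i hival ⟨s, hs, hD⟩
    rcases (pvD_succ routes source k s).1 hD with h | ⟨r, hr, hsr, t, htr, ht⟩
    · rcases inv.hE i hival ⟨s, hs, h⟩ with h' | ⟨s', hs', _⟩
      · exact Or.inl h'
      · simp at hs'
    · obtain ⟨m, hmval, hmroute⟩ := pvIdxOf routes hr
      have hmvis : m ∈ vis.keys := by
        rcases inv.hE m hmval ⟨t, by rwa [hmroute], ht⟩ with h' | ⟨s', hs', _⟩
        · exact h'
        · simp at hs'
      rcases inv.hF m hmvis s (by rwa [hmroute]) with h' | h' | h'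
      · exact Or.inl (h' i hival hs)
      · simp at h'
      · exact Or.inr ⟨s, h', hs⟩
  · -- hF
    intro i hi s hs
    rcases inv.hF i hi s hs with h | h | h
    · exact Or.inl h
    · simp at h
    · exact Or.inr (Or.inl h)
  · -- hG
    intro i hival hti s hs d' hd' hD
    rcases Nat.lt_or_ge d' k with h | h
    · exact inv.hG i hival hti s hs d' h hD
    · have : d' = k := by omega
      subst this
      have hivis : i ∈ vis.keys := by
        rcases inv.hE i hival ⟨s, hs, hD⟩ with h' | ⟨s', hs', _⟩
        · exact h'
        · simp at hs'
      exact inv.hvisT i hivis hti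
  · -- hfuel
    have := inv.hfuel
    simpa using by simpa using this
theorem pvStep (routes : List (List Int)) (source target : Int) (f : Nat) (k : Nat)
    (c : Int) (cs nxt : List Int) (vis : PySem.Dict Int Int)
    (hsne : source ≠ target)
    (IH : ∀ (k' : Nat) (cur' nxt' : List Int) (vis' : PySem.Dict Int Int),
        pvInv routes source target k' cur' nxt' vis' f →
        pvBusLoop (routes.map PySem.Set.ofList) (pvAdj routes) target (routes.length) f
          (cur'.map (fun s => (s, (k' : Int))) ++ nxt'.map (fun s => (s, (k' : Int) + 1))) vis'
          = pvAns routes source target)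
    (inv : pvInv routes source target k (c :: cs) nxt vis (f + 1)) :
    pvBusLoop (routes.map PySem.Set.ofList) (pvAdj routes) target (routes.length) (f + 1)
      ((c :: cs).map (fun s => (s, (k : Int))) ++ nxt.map (fun s => (s, (k : Int) + 1))) vis
      = pvAns routes source target := by
  have hkn : ¬ ((k : Int) > (routes.length : Int)) := by
    have hb := pvKeysBound routes vis.keys inv.hnd inv.hvk
    have hs := pvSize_eq vis
    rcases inv.hdn with h | h <;> omega
  simp only [List.map_cons, List.cons_append]
  rw [pvBusLoop, if_neg hkn]
  have hvaladj : ∀ i ∈ (pvAdj routes).getD c [], pvValid routes i :=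
    fun i hi => ((pvAdj_mem routes c i).1 hi).1
  have hcin : ∀ i ∈ (pvAdj routes).getD c [], c ∈ pvRoute routes i :=
    fun i hi => ((pvAdj_mem routes c i).1 hi).2
  by_cases hhit : ∃ i ∈ (pvAdj routes).getD c [], target ∈ pvRoute routes i
  · have h1 := pvInner_hit routes target (k : Int) ((pvAdj routes).getD c [])
      (cs.map (fun s => (s, (k : Int))) ++ nxt.map (fun s => (s, (k : Int) + 1))) vis hvaladj hhit
    rcases hres : pvBusInner (routes.map PySem.Set.ofList) target (k : Int)
        ((pvAdj routes).getD c [])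
        (cs.map (fun s => (s, (k : Int))) ++ nxt.map (fun s => (s, (k : Int) + 1))) vis
      with ⟨o, q', v'⟩
    rw [hres] at h1
    simp only at h1
    subst h1
    simp only
    obtain ⟨i, hi, hti⟩ := hhit
    have hDk1 : pvD routes source (k + 1) target = true := by
      refine (pvD_succ routes source k target).2 (Or.inr ?_)
      exact ⟨pvRoute routes i, pvRoute_mem routes i (hvaladj i hi), hti,
        c, hcin i hi, inv.hcur c (by simp)⟩
    have hans := pvAns_hit routes source target (k + 1) hDk1
      (fun j hj => pvMissBelow routes source target k (c :: cs) nxt vis (f + 1) hsne inv j (by omega))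
    rw [hans]
    push_cast
    rfl
  · push Not at hhit
    obtain ⟨ns, vis', heq, hkeys, hsrc, hcov, hnd', hle, hlt, hsum⟩ :=
      pvInner_miss routes target (k : Int) ((pvAdj routes).getD c [])
        (cs.map (fun s => (s, (k : Int))) ++ nxt.map (fun s => (s, (k : Int) + 1))) vis
        hvaladj hhit inv.hnd
    rw [heq]
    have hql : cs.map (fun s => (s, (k : Int))) ++ nxt.map (fun s => (s, (k : Int) + 1))
        ++ ns.map (fun s => (s, (k : Int) + 1))
        = cs.map (fun s => (s, (k : Int))) ++ (nxt ++ ns).map (fun s => (s, (k : Int) + 1)) := by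
      rw [List.map_append, List.append_assoc]
    simp only
    rw [hql]
    refine IH k cs (nxt ++ ns) vis' ?_
    have hDk1 : ∀ s ∈ ns, pvD routes source (k + 1) s = true := by
      intro s hs
      obtain ⟨i, hi, his⟩ := hsrc s hs
      refine (pvD_succ routes source k s).2 (Or.inr ?_)
      exact ⟨pvRoute routes i, pvRoute_mem routes i (hvaladj i hi), his,
        c, hcin i hi, inv.hcur c (by simp)⟩
    refine ⟨fun s hs => inv.hcur s (by simp [hs]), ?_, ?_, ?_, ?_, ?_, inv.hG, hnd', ?_, ?_, ?_⟩
    · -- hnxt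
      intro s hs
      rcases List.mem_append.1 hs with h | h
      · exact inv.hnxt s h
      · exact hDk1 s h
    · -- hvk
      intro i hi
      rcases (hkeys i).1 hi with h | h
      · exact inv.hvk i h
      · exact hvaladj i h
    · -- hvisT
      intro i hi
      rcases (hkeys i).1 hi with h | h
      · exact inv.hvisT i h
      · exact hhit i h
    · -- hE
      rintro i hival ⟨s, hs, hD⟩
      rcases inv.hE i hival ⟨s, hs, hD⟩ with h | ⟨s', hs', hsi'⟩
      · exact Or.inl ((hkeys i).2 (Or.inl h))
      · rcases List.mem_cons.1 hs' with rfl | h'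
        · exact Or.inl ((hkeys i).2 (Or.inr ((pvAdj_mem routes s' i).2 ⟨hival, hsi'⟩)))
        · exact Or.inr ⟨s', h', hsi'⟩
    · -- hF
      intro i hi s hs
      rcases (hkeys i).1 hi with hiv | hadj
      · rcases inv.hF i hiv s hs with h | h | h
        · refine Or.inl ?_
          intro j hjval hsj
          exact (hkeys j).2 (Or.inl (h j hjval hsj))
        · rcases List.mem_cons.1 h with rfl | h'
          · refine Or.inl ?_
            intro j hjval hsj
            exact (hkeys j).2 (Or.inr ((pvAdj_mem routes s j).2 ⟨hjval, hsj⟩))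
          · exact Or.inr (Or.inl h')
        · exact Or.inr (Or.inr (List.mem_append.2 (Or.inl h)))
      · by_cases hiv : i ∈ vis.keys
        · rcases inv.hF i hiv s hs with h | h | h
          · refine Or.inl ?_
            intro j hjval hsj
            exact (hkeys j).2 (Or.inl (h j hjval hsj))
          · rcases List.mem_cons.1 h with rfl | h'
            · refine Or.inl ?_
              intro j hjval hsj
              exact (hkeys j).2 (Or.inr ((pvAdj_mem routes s j).2 ⟨hjval, hsj⟩))
            · exact Or.inr (Or.inl h')
          · exact Or.inr (Or.inr (List.mem_append.2 (Or.inl h)))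
        · exact Or.inr (Or.inr (List.mem_append.2 (Or.inr (hcov i hadj hiv s hs))))
    · -- hdn
      rcases inv.hdn with h | h
      · exact Or.inl (le_trans h hle)
      · exact Or.inr h
    · -- hnx
      intro hne
      by_cases hn : nxt = []
      · have hns : ns ≠ [] := by
          intro h; apply hne; rw [hn, h]; rfl
        have := hlt hns
        rcases inv.hdn with h | h <;> omega
      · have := inv.hnx hn
        omega
    · -- hfuel
      have h1 := inv.hfuel
      simp only [List.length_cons, List.length_append] at h1 ⊢
      omega

theorem pvMain (routes : List (List Int)) (source target : Int) (hsne : source ≠ target) :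
    ∀ (fuel : Nat) (k : Nat) (cur nxt : List Int) (vis : PySem.Dict Int Int),
    pvInv routes source target k cur nxt vis fuel →
    pvBusLoop (routes.map PySem.Set.ofList) (pvAdj routes) target (routes.length) fuel
      (cur.map (fun s => (s, (k : Int))) ++ nxt.map (fun s => (s, (k : Int) + 1))) vis
      = pvAns routes source target := by
  intro fuel
  induction fuel with
  | zero =>
    intro k cur nxt vis inv
    have := inv.hfuel
    omega
  | succ f ihf =>
    intro k cur nxt vis inv
    match cur with
    | c :: cs => exact pvStep routes source target f k c cs nxt vis hsne ihf inv
    | [] =>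
      match nxt with
      | [] =>
        rw [pvAns_neg routes source target
          (pvNoTarget routes source target k vis (f + 1) hsne inv)]
        simp [pvBusLoop]
      | s0 :: rest =>
        have inv' := pvTrans routes source target k (s0 :: rest) vis (f + 1) (by simp) inv
        have h := pvStep routes source target f (k + 1) s0 rest [] vis hsne ihf inv'
        have hcast : ((k + 1 : Nat) : Int) = (k : Int) + 1 := by push_cast; ring
        rw [hcast] at h
        simpa using h

theorem pvListSumRange (l : List Nat) :
    ∑ j ∈ Finset.range l.length, l.getD j 0 = l.sum := by
  induction l with
  | nil => simp
  | cons a tl ih =>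
    rw [List.length_cons, Finset.sum_range_succ']
    simp only [List.getD_cons_succ, List.getD_cons_zero, ih, List.sum_cons]
    omega

theorem pvUnvisSum_bound (routes : List (List Int)) :
    pvUnvisSum routes PySem.Dict.empty ≤ routes.flatten.length := by
  have hterm : ∀ j ∈ Finset.range routes.length,
      (if ((j : Int) ∈ (PySem.Dict.empty : PySem.Dict Int Int).keys) then 0
        else (PySem.Set.ofList (pvRoute routes (j : Int))).length)
      ≤ (routes.map List.length).getD j 0 := by
    intro j hj
    have h1 : (PySem.Set.ofList (pvRoute routes (j : Int))).length ≤ (pvRoute routes (j : Int)).length :=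
      PySem.Set.length_ofList_le _
    have h2 : pvRoute routes (j : Int) = routes.getD j [] := by
      simp [pvRoute]
    have h3 : (routes.map List.length).getD j 0 = (routes.getD j []).length := by
      rcases Nat.lt_or_ge j routes.length with h | h
      · simp [List.getD_eq_getElem?_getD, h]
      · rw [List.getD_eq_getElem?_getD, List.getD_eq_getElem?_getD,
          List.getElem?_eq_none (by simpa using h), List.getElem?_eq_none (by simpa using h)]
        rfl
    split
    · omega
    · rw [h3, ← h2]; omega
  calc pvUnvisSum routes PySem.Dict.empty
      ≤ ∑ j ∈ Finset.range routes.length, (routes.map List.length).getD j 0 :=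
        Finset.sum_le_sum hterm
    _ = (routes.map List.length).sum := by
        rw [← pvListSumRange (routes.map List.length)]
        simp
    _ = routes.flatten.length := List.length_flatten.symm

theorem pvA_eq (routes : List (List Int)) (source target : Int) (hsne : source ≠ target) :
    bus_routes routes source target = pvAns routes source target := by
  unfold bus_routes
  rw [if_neg hsne]
  simp only [pvBuild routes 0 [] PySem.Dict.empty, List.nil_append]
  have hadj : pvAdjFrom routes 0 PySem.Dict.empty = pvAdj routes := rfl
  rw [hadj]
  have hq : [((source : Int), (0 : Int))]
      = ([source].map (fun s => (s, ((0 : Nat) : Int)))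
        ++ ([] : List Int).map (fun s => (s, ((0 : Nat) : Int) + 1))) := by simp
  rw [hq]
  refine pvMain routes source target hsne (routes.flatten.length + 2) 0 [source] [] PySem.Dict.empty ?_
  refine ⟨?_, by simp, ?_, ?_, ?_, ?_, by omega, ?_, Or.inr rfl, by simp, ?_⟩
  · intro s hs
    simp only [List.mem_singleton] at hs
    subst hs
    simp [pvD]
  · intro i hi
    simp [PySem.Dict.keys_empty] at hi
  · intro i hi
    simp [PySem.Dict.keys_empty] at hi
  · rintro i hival ⟨s, hs, hD⟩
    rw [pvD_zero] at hD
    subst hD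
    exact Or.inr ⟨s, by simp, hs⟩
  · intro i hi
    simp [PySem.Dict.keys_empty] at hi
  · simp
  · have := pvUnvisSum_bound routes
    simp only [List.length_singleton, List.length_nil]
    omega

theorem pvRound (routes : List (List Int)) (reach : PySem.Set Int) :
    ∀ (acc : PySem.Set Int), acc.Nodup →
    ∃ suf : List Int,
      routes.foldl (fun nw route =>
        if route.any (fun s => PySem.Set.contains reach s) then PySem.Set.update nw route else nw) acc
      = acc ++ suf ∧
      (acc ++ suf : List Int).Nodup ∧
      (∀ x, x ∈ acc ++ suf ↔ x ∈ acc ∨ ∃ r ∈ routes, x ∈ r ∧ ∃ t ∈ r, t ∈ reach) := by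
  induction routes with
  | nil =>
    intro acc hnd
    exact ⟨[], by simp, by simpa using hnd, by simp⟩
  | cons r tl ih =>
    intro acc hnd
    by_cases ha : r.any (fun s => PySem.Set.contains reach s) = true
    · have hnd1 : (PySem.Set.update acc r).Nodup := PySem.Set.nodup_update acc r hnd
      obtain ⟨suf, heq, hnd2, hmem⟩ := ih (PySem.Set.update acc r) hnd1
      have hupd : PySem.Set.update acc r
          = acc ++ (PySem.Set.ofList r).filter (fun y => !(PySem.Set.contains acc y)) :=
        PySem.Set.update_eq_append_filter ..
      have hreach : ∃ t ∈ r, t ∈ reach := by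
        obtain ⟨t, ht, hc⟩ := List.any_eq_true.1 ha
        exact ⟨t, ht, (PySem.Set.contains_iff _ _).1 hc⟩
      refine ⟨(PySem.Set.ofList r).filter (fun y => !(PySem.Set.contains acc y)) ++ suf, ?_, ?_, ?_⟩
      · rw [List.foldl_cons, if_pos ha, heq, hupd, List.append_assoc]
      · rw [← List.append_assoc, ← hupd]; exact hnd2
      · intro x
        rw [← List.append_assoc, ← hupd, hmem x, PySem.Set.mem_update]
        constructor
        · rintro ((h | h) | ⟨r', hr', hxr', hw⟩)
          · exact Or.inl h
          · exact Or.inr ⟨r, by simp, h, hreach⟩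
          · exact Or.inr ⟨r', by simp [hr'], hxr', hw⟩
        · rintro (h | ⟨r', hr', hxr', hw⟩)
          · exact Or.inl (Or.inl h)
          · rcases List.mem_cons.1 hr' with rfl | h'
            · exact Or.inl (Or.inr hxr')
            · exact Or.inr ⟨r', h', hxr', hw⟩
    · obtain ⟨suf, heq, hnd2, hmem⟩ := ih acc hnd
      refine ⟨suf, by rw [List.foldl_cons, if_neg ha]; exact heq, hnd2, ?_⟩
      intro x
      rw [hmem x]
      constructor
      · rintro (h | ⟨r', hr', hxr', hw⟩)
        · exact Or.inl h
        · exact Or.inr ⟨r', by simp [hr'], hxr', hw⟩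
      · rintro (h | ⟨r', hr', hxr', hw⟩)
        · exact Or.inl h
        · rcases List.mem_cons.1 hr' with rfl | h'
          · exfalso
            apply ha
            obtain ⟨t, ht, htw⟩ := hw
            exact List.any_eq_true.2 ⟨t, ht, (PySem.Set.contains_iff _ _).2 htw⟩
          · exact Or.inr ⟨r', h', hxr', hw⟩

theorem pvStab (routes : List (List Int)) (source : Int) (k : Nat)
    (h : ∀ t, pvD routes source (k + 1) t = pvD routes source k t) :
    ∀ m x, pvD routes source (k + m) x = pvD routes source k x := by
  intro m
  induction m with
  | zero => intro x; rfl
  | succ m ih =>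
    intro x
    have : pvD routes source (k + m + 1) x = pvD routes source (k + 1) x :=
      pvD_congr routes source ih x
    rw [show k + (m + 1) = k + m + 1 from rfl, this, h x]

theorem pvB_main (routes : List (List Int)) (source target : Int) :
    ∀ (f : Nat) (k : Nat) (reach : PySem.Set Int),
    reach.Nodup →
    (∀ x, x ∈ reach ↔ pvD routes source k x = true) →
    (∀ m ≤ k, ¬ pvD routes source m target = true) →
    reach ⊆ source :: routes.flatten →
    routes.flatten.length + 3 ≤ f + reach.length →
    pvAltLoop routes target f ((k : Int) + 1) reach = pvAns routes source target := by
  intro f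
  induction f with
  | zero =>
    intro k reach hnd hmem hmiss hsub hfl
    have := (hnd.subperm hsub).length_le
    have h2 : (source :: routes.flatten).length = routes.flatten.length + 1 := by simp
    omega
  | succ f ih =>
    intro k reach hnd hmem hmiss hsub hfl
    obtain ⟨suf, heq, hndn, hmemn⟩ := pvRound routes reach (PySem.Set.ofList reach)
      (PySem.Set.nodup_ofList reach)
    have hofl : PySem.Set.ofList reach = reach := PySem.Set.ofList_eq_self_of_nodup reach hnd
    rw [hofl] at heq hndn hmemn
    have hD1 : ∀ x, x ∈ reach ++ suf ↔ pvD routes source (k + 1) x = true := by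
      intro x
      rw [hmemn x, pvD_succ]
      constructor
      · rintro (h | ⟨r, hr, hxr, t, ht, htw⟩)
        · exact Or.inl ((hmem x).1 h)
        · exact Or.inr ⟨r, hr, hxr, t, ht, (hmem t).1 htw⟩
      · rintro (h | ⟨r, hr, hxr, t, ht, htw⟩)
        · exact Or.inl ((hmem x).2 h)
        · exact Or.inr ⟨r, hr, hxr, t, ht, (hmem t).2 htw⟩
    rw [pvAltLoop]
    simp only [hofl, heq]
    by_cases hc : PySem.Set.contains (reach ++ suf : List Int) target = true
    · rw [if_pos hc]
      have hDt : pvD routes source (k + 1) target = true :=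
        (hD1 target).1 ((PySem.Set.contains_iff _ _).1 hc)
      rw [pvAns_hit routes source target (k + 1) hDt (fun j hj => hmiss j (by omega))]
      push_cast
      ring
    · rw [if_neg hc]
      have hct : target ∉ (reach ++ suf : List Int) :=
        fun h => hc ((PySem.Set.contains_iff _ _).2 h)
      by_cases hlen : PySem.Set.len (reach ++ suf : List Int) = PySem.Set.len reach
      · rw [if_pos hlen]
        have hsuf : suf = [] := by
          simp only [PySem.Set.len, List.length_append] at hlen
          have : suf.length = 0 := by omega
          exact List.eq_nil_of_length_eq_zero this
        subst hsuf
        have hstab : ∀ t, pvD routes source (k + 1) t = pvD routes source k t := by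
          intro t
          have h1 := hD1 t
          have h2 := hmem t
          simp only [List.append_nil] at h1
          by_cases b1 : pvD routes source (k + 1) t = true <;>
            by_cases b2 : pvD routes source k t = true <;> simp_all
        have hno : ∀ m, ¬ pvD routes source m target = true := by
          intro m hm
          rcases Nat.le_total m k with h | h
          · exact hmiss m h hm
          · have : pvD routes source (k + (m - k)) target = pvD routes source k target :=
              pvStab routes source k hstab (m - k) target
            rw [show k + (m - k) = m by omega] at this
            exact hmiss k (le_refl k) (by rw [← this]; exact hm)
        rw [pvAns_neg routes source target hno]
      · rw [if_neg hlen]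
        have hsufne : suf ≠ [] := by
          intro h
          apply hlen
          simp [h]
        have hcast : ((k : Int) + 1) + 1 = (((k + 1 : Nat) : Int) + 1) := by push_cast; ring
        rw [hcast]
        refine ih (k + 1) (reach ++ suf) hndn hD1 ?_ ?_ ?_
        · intro m hm hD
          rcases Nat.lt_or_ge m (k + 1) with h | h
          · exact hmiss m (by omega) hD
          · have : m = k + 1 := by omega
            subst this
            exact hct ((hD1 target).2 hD)
        · intro x hx
          rcases List.mem_append.1 hx with h | h
          · exact hsub h
          · have := (hmemn x).1 (List.mem_append.2 (Or.inr h))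
            rcases this with h' | ⟨r, hr, hxr, _⟩
            · exact hsub h'
            · exact List.mem_cons.2 (Or.inr (List.mem_flatten.2 ⟨r, hr, hxr⟩))
        · have : 1 ≤ suf.length := List.length_pos_of_ne_nil hsufne
          simp only [List.length_append]
          omega

theorem pvB_eq (routes : List (List Int)) (source target : Int) (hsne : source ≠ target) :
    bus_routes_alt routes source target = pvAns routes source target := by
  unfold bus_routes_alt
  rw [if_neg hsne]
  have hinit : PySem.Set.add PySem.Set.empty source = [source] := rfl
  rw [hinit]
  have h1 : (1 : Int) = ((0 : Nat) : Int) + 1 := by norm_num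
  rw [h1]
  refine pvB_main routes source target (routes.flatten.length + 2) 0 [source] (by simp) ?_ ?_ ?_ ?_
  · intro x
    simp [pvD_zero]
  · intro m hm
    have : m = 0 := by omega
    subst this
    rw [pvD_zero]
    exact fun h => hsne h.symm
  · intro x hx
    simp only [List.mem_singleton] at hx
    subst hx
    simp
  · simp

-- ===== VERDICT (by name: the statement is the Claim_ definition above) =====
theorem bus_routes_spec : Claim_equal_bus_routes := by
  intro routes source target _
  unfold Spec_bus_routes
  by_cases h : source = target
  · simp [bus_routes, bus_routes_alt, h]
  · rw [pvA_eq routes source target h, pvB_eq routes source target h]
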